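-- pv_equiv track=rewrite | github.com/hearues-zueke-github/python_programs | modulo_sequences/simple_linear_modulo_sequences.py | get_full_xor_cycle_if_possible
-- ===== SOURCE A (Python) =====
-- def get_full_xor_cycle_if_possible(a, b, m):
-- 	x = 0
-- 	s = set([0])
-- 	for _ in range(0, m):
-- 		x = (a ^ x + b) % m
-- 		if x in s:
-- 			break
-- 		s.add(x)
--
-- 	is_full_cycle = False
-- 	l_cycle = []
-- 	if len(s) == m:
-- 		is_full_cycle = True
-- 		x = 0
-- 		l_cycle = [0]
-- 		for _ in range(0, m-1):
-- 			x = (a ^ x + b) % m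
-- 			l_cycle.append(x)
--
-- 	return is_full_cycle, l_cycle
-- ===== SOURCE B (Python) =====
-- def get_full_xor_cycle_if_possible(a, b, m):
--     # one fused walk: an insertion-ordered dict is both the visited set and the
--     # cycle order, so no separate list and no second walk of the recurrence
--     seen = dict.fromkeys([0])
--     x = 0
--     for _ in range(m):
--         x = (a ^ x + b) % m
--         if x in seen:
--             break
--         seen[x] = None
--     if len(seen) != m:
--         return False, []
--     return True, list(seen)
-- ===== Notes on version B (the rewrite author's own statement) =====
-- stated objective: simpler
-- what changed: A walks the recurrence with a break-on-repeat set and then, when full, re-walks it a second time to build the cycle list; B does one walk over an insertion-ordered dict that serves at once as the visited set and as the cycle order, returning list(seen) - no separate list and no second walk.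
import Mathlib
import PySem

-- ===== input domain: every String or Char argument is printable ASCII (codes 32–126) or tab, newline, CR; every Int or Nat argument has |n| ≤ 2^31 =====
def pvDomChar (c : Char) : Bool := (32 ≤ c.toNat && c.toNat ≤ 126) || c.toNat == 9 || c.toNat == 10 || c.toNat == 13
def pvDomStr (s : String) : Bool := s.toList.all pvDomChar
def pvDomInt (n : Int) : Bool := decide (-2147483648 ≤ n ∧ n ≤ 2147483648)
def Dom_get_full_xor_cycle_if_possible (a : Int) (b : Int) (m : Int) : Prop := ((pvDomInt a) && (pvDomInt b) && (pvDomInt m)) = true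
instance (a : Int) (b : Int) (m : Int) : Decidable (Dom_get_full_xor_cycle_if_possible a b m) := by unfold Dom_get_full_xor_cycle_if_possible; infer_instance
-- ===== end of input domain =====

-- B replaces A's break-on-repeat set walk plus second rebuilding walk by ONE
-- walk over an insertion-ordered dict that is at once the visited set and the
-- cycle order (the result list is list(seen)); objective: simpler, not faster.
--
-- Representation note (port A): every value A's loop sees is a residue in [0, m)
-- (the loop body runs only when m ≥ 1 and x % m with m ≥ 1 lies in [0, m)), so
-- Python's set s is represented exactly by a Bool array of length m (membership
-- = the flag, s.add = setting the flag, len(s) = the maintained count), and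
-- Python's list with O(1) .append is represented by Array Int with push.

-- shared recurrence step: (a ^ x + b) % m, with Python precedence a ^ (x + b)
def pvStep (a b m x : Int) : Int := PySem.Int.mod (PySem.Int.bxor a (x + b)) m

-- ===== PORT A =====
-- A's first loop: walk the recurrence, collecting values in the set, break on repeat
def pvLoopA (a b m : Int) : Nat → Int → Array Bool → Nat → Int × Array Bool × Nat
  | 0, x, v, c => (x, v, c)
  | n+1, x, v, c =>
    let x' := pvStep a b m x
    if v.getD x'.toNat false then (x', v, c)
    else pvLoopA a b m n x' (v.set! x'.toNat true) (c + 1)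

-- A's second loop: re-walk the recurrence, appending each value to the list
def pvLoopRebuild (a b m : Int) : Nat → Int → Array Int → Int × Array Int
  | 0, x, l => (x, l)
  | n+1, x, l =>
    let x' := pvStep a b m x
    pvLoopRebuild a b m n x' (l.push x')

def get_full_xor_cycle_if_possible (a : Int) (b : Int) (m : Int) : Bool × List Int :=
  let r := pvLoopA a b m m.toNat 0 ((Array.replicate m.toNat false).set! 0 true) 1
  if (r.2.2 : Int) = m then
    (true, ((pvLoopRebuild a b m (m - 1).toNat 0 #[0]).2).toList)
  else
    (false, [])

-- ===== PORT B =====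
-- B's single loop over the insertion-ordered dict seen (values all None):
-- represented exactly by its parts — a hash set for 'x in seen' / 'seen[x] = None'
-- and the insertion-ordered key list (kept newest-first, reversed at the end)
-- for 'list(seen)'; len(seen) is that list's length.
def pvLoopB (a b m : Int) : Nat → Int → Std.HashSet Int → List Int → List Int
  | 0, _, _, ks => ks
  | n+1, x, seen, ks =>
    let x' := pvStep a b m x
    if seen.contains x' then ks
    else pvLoopB a b m n x' (seen.insert x') (x' :: ks)

def get_full_xor_cycle_if_possible_alt (a : Int) (b : Int) (m : Int) : Bool × List Int :=
  let ks := pvLoopB a b m m.toNat 0 ((∅ : Std.HashSet Int).insert 0) [0]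
  if ¬ ((ks.length : Int) = m) then (false, [])
  else (true, ks.reverse)

-- ===== PRECONDITION & SPEC =====
def Spec_get_full_xor_cycle_if_possible (a : Int) (b : Int) (m : Int) (out : Bool × List Int) : Prop := out = get_full_xor_cycle_if_possible_alt a b m
instance (a : Int) (b : Int) (m : Int) (out : Bool × List Int) : Decidable (Spec_get_full_xor_cycle_if_possible a b m out) := by unfold Spec_get_full_xor_cycle_if_possible; infer_instance

-- ===== CLAIM (what is proved, stated in full; the proofs are below) =====
def Claim_equal_get_full_xor_cycle_if_possible : Prop := ∀ (a : Int) (b : Int) (m : Int), Dom_get_full_xor_cycle_if_possible a b m → Spec_get_full_xor_cycle_if_possible a b m (get_full_xor_cycle_if_possible a b m)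

-- ===== LEMMAS AND PROOFS =====

-- list model of A's first loop: the set as the list of collected values
def pvLoopM (a b m : Int) : Nat → Int → List Int → List Int
  | 0, _, S => S
  | n+1, x, S =>
    let x' := pvStep a b m x
    if x' ∈ S then S else pvLoopM a b m n x' (x' :: S)

-- the first n values of the recurrence after x (proof-side description of the walk)
def pvWalk (a b m : Int) : Nat → Int → List Int
  | 0, _ => []
  | n+1, x =>
    let x' := pvStep a b m x
    x' :: pvWalk a b m n x'

-- one-step unfoldings, to control rewriting
theorem pvLoopM_succ (a b m : Int) (n : Nat) (x : Int) (S : List Int) :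
    pvLoopM a b m (n+1) x S =
      if pvStep a b m x ∈ S then S
      else pvLoopM a b m n (pvStep a b m x) (pvStep a b m x :: S) := rfl

theorem pvStep_bounds (a b m x : Int) (hm : 0 < m) :
    0 ≤ pvStep a b m x ∧ pvStep a b m x < m :=
  ⟨PySem.Int.mod_nonneg _ hm, PySem.Int.mod_lt _ hm⟩

-- array reads after a write / on the initial array
theorem pvArr_getD_set! (v : Array Bool) (i j : Nat) (x : Bool) (hj : j < v.size) :
    (v.set! i x).getD j false = if j = i then x else v.getD j false := by
  simp [Array.set!_eq_setIfInBounds, Array.getD_eq_getD_getElem?, hj]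
  by_cases h : j = i <;> simp [h]
  exact Array.getElem_setIfInBounds_ne hj (fun e => h e.symm)

theorem pvArr_init_getD (n i : Nat) (hi : i < n) :
    ((Array.replicate n false).set! 0 true).getD i false = if i = 0 then true else false := by
  rw [pvArr_getD_set! _ _ _ _ (by simpa using hi)]
  by_cases h0 : i = 0 <;> simp [h0, Array.getD_eq_getD_getElem?, hi]

-- the rebuild loop appends exactly the walk
theorem pvRebuild_toList (a b m : Int) : ∀ (n : Nat) (x : Int) (l : Array Int),
    (pvLoopRebuild a b m n x l).2.toList = l.toList ++ pvWalk a b m n x := by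
  intro n
  induction n with
  | zero => intro x l; simp [pvLoopRebuild, pvWalk]
  | succ k ih => intro x l; simp [pvLoopRebuild, pvWalk, ih]

-- the loop adds a value on every step iff the walk is fresh and repeat-free
theorem pvLoopM_full_iff (a b m : Int) : ∀ (n : Nat) (x : Int) (S : List Int),
    (pvLoopM a b m n x S).length = S.length + n ↔
      ((pvWalk a b m n x).Nodup ∧ ∀ y ∈ pvWalk a b m n x, y ∉ S) := by
  intro n
  induction n with
  | zero => intro x S; simp [pvLoopM, pvWalk]
  | succ k ih =>
    intro x S
    rw [pvLoopM_succ]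
    simp only [pvWalk]
    split
    · rename_i hmem
      constructor
      · intro h; exact absurd h (by omega)
      · rintro ⟨-, hfresh⟩
        exact absurd hmem (hfresh (pvStep a b m x) (by simp))
    · rename_i hmem
      have hlen : S.length + (k + 1) = (pvStep a b m x :: S).length + k := by
        simp; omega
      rw [hlen, ih]
      constructor
      · rintro ⟨hnd, hfr⟩
        refine ⟨List.nodup_cons.2 ⟨fun hx => (hfr _ hx (by simp)).elim, hnd⟩, ?_⟩
        intro y hy
        rcases List.mem_cons.1 hy with hy | hy
        · exact hy ▸ hmem
        · exact fun hS => hfr y hy (by simp [hS])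
      · rintro ⟨hcons, hfr⟩
        obtain ⟨hx, hnd⟩ := List.nodup_cons.1 hcons
        refine ⟨hnd, ?_⟩
        intro y hy hyS
        rcases List.mem_cons.1 hyS with h | h
        · exact hx (h ▸ hy)
        · exact hfr y (by simp [hy]) h

-- one more step either changes nothing (the loop broke) or adds one more value
theorem pvLoopM_step (a b m : Int) : ∀ (n : Nat) (x : Int) (S : List Int),
    pvLoopM a b m (n+1) x S = pvLoopM a b m n x S ∨
      (pvLoopM a b m (n+1) x S).length = S.length + (n+1) := by
  intro n
  induction n with
  | zero =>
    intro x S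
    rw [pvLoopM_succ]
    split
    · exact Or.inl rfl
    · right; simp [pvLoopM]
  | succ k ih =>
    intro x S
    by_cases hmem : pvStep a b m x ∈ S
    · left
      calc pvLoopM a b m (k+1+1) x S = S := by rw [pvLoopM_succ, if_pos hmem]
        _ = pvLoopM a b m (k+1) x S := by rw [pvLoopM_succ, if_pos hmem]
    · have e1 : pvLoopM a b m (k+1+1) x S
          = pvLoopM a b m (k+1) (pvStep a b m x) (pvStep a b m x :: S) := by
        rw [pvLoopM_succ, if_neg hmem]
      have e2 : pvLoopM a b m (k+1) x S
          = pvLoopM a b m k (pvStep a b m x) (pvStep a b m x :: S) := by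
        rw [pvLoopM_succ, if_neg hmem]
      rcases ih (pvStep a b m x) (pvStep a b m x :: S) with h | h
      · left; rw [e1, e2]; exact h
      · right
        rw [e1]
        simp only [List.length_cons] at h ⊢
        omega

-- the collected values stay distinct residues of [0, m)
theorem pvLoopM_inv (a b m : Int) (hm : 0 < m) : ∀ (n : Nat) (x : Int) (S : List Int),
    S.Nodup → (∀ y ∈ S, 0 ≤ y ∧ y < m) →
    (pvLoopM a b m n x S).Nodup ∧ ∀ y ∈ pvLoopM a b m n x S, 0 ≤ y ∧ y < m := by
  intro n
  induction n with
  | zero => intro x S h1 h2; exact ⟨h1, h2⟩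
  | succ k ih =>
    intro x S h1 h2
    rw [pvLoopM_succ]
    split
    · exact ⟨h1, h2⟩
    · rename_i hmem
      refine ih _ _ (by simp [h1, hmem]) ?_
      intro y hy
      rcases List.mem_cons.1 hy with hy | hy
      · exact hy ▸ pvStep_bounds a b m x hm
      · exact h2 y hy

-- a duplicate-free list of residues of [0, m) has at most m elements
theorem pvNodup_len_le (m : Int) (l : List Int) (hnd : l.Nodup)
    (hb : ∀ y ∈ l, 0 ≤ y ∧ y < m) : l.length ≤ m.toNat := by
  have hsub : l.toFinset ⊆ Finset.Ico (0 : Int) m := by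
    intro y hy
    rcases hb y (List.mem_toFinset.1 hy) with ⟨h1, h2⟩
    exact Finset.mem_Ico.2 ⟨h1, h2⟩
  have := Finset.card_le_card hsub
  rw [List.toFinset_card_of_nodup hnd, Int.card_Ico] at this
  omega

-- the Bool-array loop of port A computes the length of the list model
theorem pvLoopA_model (a b m : Int) (hm : 0 < m) : ∀ (n : Nat) (x : Int)
    (S : List Int) (v : Array Bool) (c : Nat),
    v.size = m.toNat → (∀ y ∈ S, 0 ≤ y ∧ y < m) →
    (∀ i : Nat, i < m.toNat → (v.getD i false = true ↔ (i : Int) ∈ S)) →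
    c = S.length →
    (pvLoopA a b m n x v c).2.2 = (pvLoopM a b m n x S).length := by
  intro n
  induction n with
  | zero => intro x S v c _ _ _ hc; simpa [pvLoopA, pvLoopM] using hc
  | succ k ih =>
    intro x S v c hsz hb hv hc
    rcases pvStep_bounds a b m x hm with ⟨hx0, hx1⟩
    have hxn : (pvStep a b m x).toNat < m.toNat := by omega
    have hcast : ((pvStep a b m x).toNat : Int) = pvStep a b m x := Int.toNat_of_nonneg hx0
    have hmemiff : v.getD (pvStep a b m x).toNat false = true ↔ pvStep a b m x ∈ S := by
      rw [hv _ hxn, hcast]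
    simp only [pvLoopA]
    rw [pvLoopM_succ]
    by_cases hmem : pvStep a b m x ∈ S
    · rw [if_pos (hmemiff.2 hmem), if_pos hmem]
      exact hc
    · rw [if_neg (fun h => hmem (hmemiff.1 h)), if_neg hmem]
      refine ih _ (pvStep a b m x :: S) _ _ (by simp [hsz]) ?_ ?_ (by simp [hc])
      · intro y hy
        rcases List.mem_cons.1 hy with hy | hy
        · exact hy ▸ ⟨hx0, hx1⟩
        · exact hb y hy
      · intro i hi
        rw [pvArr_getD_set! _ _ _ _ (by omega)]
        by_cases hie : i = (pvStep a b m x).toNat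
        · subst hie; simp [hcast]
        · have hne : ((i : Int) ≠ pvStep a b m x) := fun h => hie (by omega)
          rw [if_neg hie, hv i hi]
          simp [hne]

-- when nothing repeats, the model collects exactly the walk (newest first)
theorem pvLoopM_full_list (a b m : Int) : ∀ (n : Nat) (x : Int) (S : List Int),
    (pvWalk a b m n x).Nodup → (∀ y ∈ pvWalk a b m n x, y ∉ S) →
    pvLoopM a b m n x S = (pvWalk a b m n x).reverse ++ S := by
  intro n
  induction n with
  | zero => intro x S _ _; simp [pvLoopM, pvWalk]
  | succ k ih =>
    intro x S hnd hfr
    simp only [pvWalk] at hnd hfr ⊢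
    obtain ⟨hx, hnd'⟩ := List.nodup_cons.1 hnd
    have hmem : pvStep a b m x ∉ S := hfr _ (by simp)
    rw [pvLoopM_succ, if_neg hmem]
    rw [ih _ _ hnd' ?_]
    · simp
    · intro y hy hyS
      rcases List.mem_cons.1 hyS with h | h
      · exact hx (h ▸ hy)
      · exact hfr y (by simp [hy]) h

-- B's loop is the list model: the hash set mirrors membership in the key list
theorem pvLoopB_model (a b m : Int) : ∀ (n : Nat) (x : Int) (seen : Std.HashSet Int)
    (ks : List Int), (∀ y : Int, seen.contains y = true ↔ y ∈ ks) →
    pvLoopB a b m n x seen ks = pvLoopM a b m n x ks := by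
  intro n
  induction n with
  | zero => intro x seen ks _; rfl
  | succ k ih =>
    intro x seen ks hinv
    simp only [pvLoopB]
    rw [pvLoopM_succ]
    by_cases hmem : pvStep a b m x ∈ ks
    · rw [if_pos ((hinv _).2 hmem), if_pos hmem]
    · rw [if_neg (fun h => hmem ((hinv _).1 h)), if_neg hmem]
      refine ih _ _ _ ?_
      intro y
      simp only [Std.HashSet.contains_insert, List.mem_cons]
      constructor
      · intro h
        rcases Bool.or_eq_true_iff.1 h with h | h
        · exact Or.inl (beq_iff_eq.1 h).symm
        · exact Or.inr ((hinv y).1 h)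
      · intro h
        rcases h with h | h
        · simp [h]
        · simp [(hinv y).2 h]

theorem pvWalk_len (a b m : Int) : ∀ (n : Nat) (x : Int), (pvWalk a b m n x).length = n := by
  intro n
  induction n with
  | zero => intro x; simp [pvWalk]
  | succ k ih => intro x; simp [pvWalk, ih]

-- ===== VERDICT (by name: the statement is the Claim_ definition above) =====
theorem get_full_xor_cycle_if_possible_spec : Claim_equal_get_full_xor_cycle_if_possible := by
  intro a b m _
  unfold Spec_get_full_xor_cycle_if_possible
  unfold get_full_xor_cycle_if_possible get_full_xor_cycle_if_possible_alt
  simp only []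
  by_cases hm : 0 < m
  case neg =>
    -- m ≤ 0: both loops run zero steps, both conditions are false
    have h0 : m.toNat = 0 := by omega
    have hcond : ¬ ((1 : Int) = m) := by omega
    simp [h0, pvLoopA, pvLoopB, hcond]
  case pos =>
    have ht : m.toNat = (m - 1).toNat + 1 := by omega
    set t := (m - 1).toNat with htdef
    set L : List Int := 0 :: pvWalk a b m t 0 with hL
    have hLlen : L.length = t + 1 := by simp [hL, pvWalk_len]
    -- port A's count equals the model's length
    have hcnt : (pvLoopA a b m m.toNat 0 ((Array.replicate m.toNat false).set! 0 true) 1).2.2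
        = (pvLoopM a b m m.toNat 0 [0]).length := by
      refine pvLoopA_model a b m hm m.toNat 0 [0] _ 1 ?_ ?_ ?_ rfl
      · simp
      · intro y hy; simp at hy; omega
      · intro i hi
        rw [pvArr_init_getD m.toNat i hi]
        by_cases hi0 : i = 0 <;> simp [hi0]
    -- the model reaches length m iff L is duplicate-free
    have hiff : (pvLoopM a b m m.toNat 0 [0]).length = m.toNat ↔ L.Nodup := by
      have hLnd : L.Nodup ↔ ((pvWalk a b m t 0).Nodup ∧ ∀ y ∈ pvWalk a b m t 0, y ∉ ([0] : List Int)) := by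
        rw [hL, List.nodup_cons]
        constructor
        · rintro ⟨h0, hnd⟩
          exact ⟨hnd, fun y hy hy0 => h0 (by simp at hy0; exact hy0 ▸ hy)⟩
        · rintro ⟨hnd, hfr⟩
          exact ⟨fun h0 => hfr 0 h0 (by simp), hnd⟩
      rw [hLnd, ← pvLoopM_full_iff, ht]
      rcases pvLoopM_step a b m t 0 [0] with hcase | hcase
      · rw [hcase]; simp only [List.length_cons, List.length_nil]; omega
      · rw [hcase]
        have hinv := pvLoopM_inv a b m hm (t+1) 0 [0] (by simp) (by intro y hy; simp at hy; omega)
        have := pvNodup_len_le m _ hinv.1 hinv.2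
        rw [hcase] at this
        simp only [List.length_cons, List.length_nil] at *
        omega
    -- B's key list is the model
    have hks : pvLoopB a b m m.toNat 0 ((∅ : Std.HashSet Int).insert 0) [0]
        = pvLoopM a b m m.toNat 0 [0] := by
      refine pvLoopB_model a b m m.toNat 0 _ [0] ?_
      intro y
      simp [Std.HashSet.contains_insert]
      exact eq_comm
    have hBiff : (((pvLoopB a b m m.toNat 0 ((∅ : Std.HashSet Int).insert 0) [0]).length : Nat) : Int) = m ↔ L.Nodup := by
      rw [hks]
      constructor
      · intro h; exact hiff.1 (by omega)
      · intro h; have := hiff.2 h; omega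
    -- in the full case the model is exactly L reversed
    have hfull_list : L.Nodup → pvLoopM a b m m.toNat 0 [0] = L.reverse := by
      intro hnd
      rw [ht]
      rcases pvLoopM_step a b m t 0 [0] with hcase | hcase
      · rw [hcase]
        obtain ⟨hwnd, hwfr⟩ := (List.nodup_cons.1 (hL ▸ hnd) : _)
        rw [pvLoopM_full_list a b m t 0 [0] hwfr ?_]
        · simp [hL]
        · intro y hy hy0
          simp at hy0
          exact hwnd (hy0 ▸ hy)
      · exfalso
        have hinv := pvLoopM_inv a b m hm (t+1) 0 [0] (by simp) (by intro y hy; simp at hy; omega)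
        have := pvNodup_len_le m _ hinv.1 hinv.2
        simp only [List.length_cons, List.length_nil] at hcase this
        omega
    have hA : (((pvLoopA a b m m.toNat 0 ((Array.replicate m.toNat false).set! 0 true) 1).2.2 : Nat) : Int) = m ↔ L.Nodup := by
      rw [hcnt]
      constructor
      · intro h; exact hiff.1 (by omega)
      · intro h; have := hiff.2 h; omega
    by_cases hnd : L.Nodup
    · rw [if_pos (hA.2 hnd), if_neg (not_not_intro (hBiff.2 hnd))]
      rw [hks, hfull_list hnd]
      simp [pvRebuild_toList, hL]
    · rw [if_neg (fun h => hnd (hA.1 h)), if_pos (fun h => hnd (hBiff.1 h))]
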